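-- pv_equiv track=rewrite | github.com/PauloFavero/Python | caca_palavras/main.py | verticalBaixo
-- ===== SOURCE A (Python) =====
-- def verticalBaixo(p, altura, i, j, diagrama_entrada):
--
--     aux = 0
--     contador = 0
--     for aux in range(len (p)):
--         if i + aux < altura:
--             if diagrama_entrada[i+aux][j] == p[aux]:
--                 contador = contador + 1
--     if contador == len (p):
--         return True
--     else:
--         return False
-- ===== SOURCE B (Python) =====
-- def verticalBaixo(p, altura, i, j, diagrama_entrada):
--     # Check the fit once, then compare the whole column substring against p.
--     if not p:
--         return True
--     if i + len(p) > altura: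
--         return False
--     return ''.join(diagrama_entrada[i + k][j] for k in range(len(p))) == p
-- ===== Notes on version B (the rewrite author's own statement) =====
-- stated objective: simpler
-- what changed: Replaces A's count-every-guarded-match-then-compare-to-len loop by a single bounds check (i + len(p) > altura => False) followed by one comparison of the extracted column substring against p.
import Mathlib
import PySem

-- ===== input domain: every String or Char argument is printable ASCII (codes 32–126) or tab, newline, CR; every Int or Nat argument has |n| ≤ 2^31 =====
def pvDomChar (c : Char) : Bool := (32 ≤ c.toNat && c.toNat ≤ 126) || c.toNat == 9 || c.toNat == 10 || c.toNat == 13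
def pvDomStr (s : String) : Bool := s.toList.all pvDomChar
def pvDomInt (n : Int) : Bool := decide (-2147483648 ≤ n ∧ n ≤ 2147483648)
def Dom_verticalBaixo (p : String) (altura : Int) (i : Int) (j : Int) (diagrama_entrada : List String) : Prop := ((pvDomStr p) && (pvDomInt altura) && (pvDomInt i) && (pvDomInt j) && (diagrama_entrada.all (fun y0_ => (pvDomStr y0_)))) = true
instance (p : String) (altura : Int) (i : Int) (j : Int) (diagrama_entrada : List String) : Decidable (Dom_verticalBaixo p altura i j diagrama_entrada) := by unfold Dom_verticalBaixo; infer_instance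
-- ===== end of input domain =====

-- B replaces A's guarded match-counting loop by one bounds check plus one column-substring comparison (objective: simpler).

-- cell d (i+aux) j = diagrama_entrada[i+aux][j], none = IndexError
def pvCell (diagrama_entrada : List String) (r : Int) (j : Int) : Option Char :=
  (PySem.List.pyGet? diagrama_entrada r).bind (fun row => PySem.Str.pyGet? row j)

-- ===== PORT A =====
def verticalBaixo (p : String) (altura : Int) (i : Int) (j : Int) (diagrama_entrada : List String) : Bool :=
  let contador :=
    (List.range p.toList.length).foldl (fun (contador aux : Nat) =>
      if i + (aux : Int) < altura then
        if pvCell diagrama_entrada (i + (aux : Int)) j = PySem.Str.pyGet? p (aux : Int) then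
          contador + 1
        else contador
      else contador) 0
  if contador = p.toList.length then true else false

-- ===== PORT B =====
def verticalBaixo_alt (p : String) (altura : Int) (i : Int) (j : Int) (diagrama_entrada : List String) : Bool :=
  if p.toList.isEmpty then true
  else if altura < i + (p.toList.length : Int) then false
  else decide ((List.range p.toList.length).map (fun (k : Nat) => pvCell diagrama_entrada (i + (k : Int)) j)
                = p.toList.map some)

-- ===== PRECONDITION & SPEC =====
-- Pre_ excludes exactly the inputs where A raises IndexError: some visited cell index is invalid.
def Pre_verticalBaixo (p : String) (altura : Int) (i : Int) (j : Int) (diagrama_entrada : List String) : Prop :=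
  ∀ aux : Nat, aux < p.toList.length → i + (aux : Int) < altura →
    (pvCell diagrama_entrada (i + (aux : Int)) j).isSome = true
instance (p : String) (altura : Int) (i : Int) (j : Int) (diagrama_entrada : List String) : Decidable (Pre_verticalBaixo p altura i j diagrama_entrada) := by unfold Pre_verticalBaixo; infer_instance
def pvWitness_verticalBaixo : String × Int × Int × Int × List String := ("ab", 3, 0, 1, ["xa", "yb", "zz"])

def Spec_verticalBaixo (p : String) (altura : Int) (i : Int) (j : Int) (diagrama_entrada : List String) (out : Bool) : Prop := out = verticalBaixo_alt p altura i j diagrama_entrada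
instance (p : String) (altura : Int) (i : Int) (j : Int) (diagrama_entrada : List String) (out : Bool) : Decidable (Spec_verticalBaixo p altura i j diagrama_entrada out) := by unfold Spec_verticalBaixo; infer_instance

-- ===== CLAIM (what is proved, stated in full; the proofs are below) =====
def Claim_equal_verticalBaixo : Prop := ∀ (p : String) (altura : Int) (i : Int) (j : Int) (diagrama_entrada : List String), Dom_verticalBaixo p altura i j diagrama_entrada → Pre_verticalBaixo p altura i j diagrama_entrada → Spec_verticalBaixo p altura i j diagrama_entrada (verticalBaixo p altura i j diagrama_entrada)

-- ===== LEMMAS AND PROOFS =====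

-- A's loop counts the indices satisfying the guarded match condition.
theorem pvFoldCount (Q : Nat → Bool) (l : List Nat) (c : Nat) :
    l.foldl (fun contador aux => if Q aux then contador + 1 else contador) c
      = c + l.countP Q := by
  induction l generalizing c with
  | nil => simp
  | cons a t ih =>
    simp only [List.foldl_cons, List.countP_cons, ih]
    by_cases h : Q a <;> simp [h] <;> omega

theorem verticalBaixo_spec : Claim_equal_verticalBaixo := by
  intro p altura i j d _ _hpre
  unfold Spec_verticalBaixo verticalBaixo verticalBaixo_alt
  set n := p.toList.length with hn
  have hbody : (fun (contador aux : Nat) =>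
      if i + (aux : Int) < altura then
        if pvCell d (i + (aux : Int)) j = PySem.Str.pyGet? p (aux : Int) then contador + 1 else contador
      else contador)
    = (fun (contador aux : Nat) => if (decide (i + (aux : Int) < altura)
          && decide (pvCell d (i + (aux : Int)) j = PySem.Str.pyGet? p (aux : Int))) = true
        then contador + 1 else contador) := by
    funext c a
    by_cases h1 : i + (a : Int) < altura <;>
      by_cases h2 : pvCell d (i + (a : Int)) j = PySem.Str.pyGet? p (a : Int) <;>
      simp [h1, h2]
  rw [hbody, pvFoldCount, Nat.zero_add]
  set Q : Nat → Bool := fun aux => decide (i + (aux : Int) < altura)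
      && decide (pvCell d (i + (aux : Int)) j = PySem.Str.pyGet? p (aux : Int)) with hQ
  have hcount : ((List.range n).countP Q = n) ↔ (∀ aux, aux < n → Q aux = true) := by
    constructor
    · intro hc aux ha
      exact List.countP_eq_length.mp (by simpa using hc) aux (List.mem_range.mpr ha)
    · intro hall
      simpa using List.countP_eq_length.mpr (fun a ha => hall a (List.mem_range.mp ha))
  by_cases h0 : n = 0
  · simp [h0, List.length_eq_zero_iff.mp (hn ▸ h0)]
  · have hne : ¬ (p.toList.isEmpty = true) := fun h => h0 (by simp [hn, List.isEmpty_iff.mp h])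
    simp only [if_neg hne]
    by_cases hfit : altura < i + (n : Int)
    · simp only [if_pos hfit]
      have hlt : (List.range n).countP Q ≠ n := by
        intro hc
        have := hcount.mp hc (n - 1) (by omega)
        simp only [hQ, Bool.and_eq_true, decide_eq_true_eq] at this
        have h1 := this.1
        have hcast : ((n - 1 : Nat) : Int) = (n : Int) - 1 := by omega
        rw [hcast] at h1
        omega
      simp [hlt]
    · simp only [if_neg hfit]
      have hstep : (if (List.range n).countP Q = n then true else false)
          = decide ((List.range n).countP Q = n) := by
        by_cases h : (List.range n).countP Q = n <;> simp [h]
      rw [hstep, decide_eq_decide, hcount]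
      constructor
      · intro hall
        apply List.ext_getElem (by simp [hn])
        intro k hk1 hk2
        simp only [List.length_map, List.length_range] at hk1
        have := hall k hk1
        simp only [hQ, Bool.and_eq_true, decide_eq_true_eq] at this
        simp only [List.getElem_map, List.getElem_range]
        rw [this.2, PySem.Str.pyGet?_natCast, List.getElem?_eq_getElem (by simpa [hn] using hk1)]
      · intro hmapeq aux ha
        have hguard : i + (aux : Int) < altura := by omega
        have hel : ((List.range n).map (fun (k : Nat) => pvCell d (i + (k : Int)) j))[aux]'(by simpa)
            = (p.toList.map some)[aux]'(by simp [← hn]; omega) := by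
          simp only [hmapeq]
        simp only [List.getElem_map, List.getElem_range] at hel
        simp only [hQ, Bool.and_eq_true, decide_eq_true_eq]
        refine ⟨hguard, ?_⟩
        rw [hel, PySem.Str.pyGet?_natCast, List.getElem?_eq_getElem (by simp [← hn]; omega)]
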